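-- pv_equiv track=rewrite | github.com/Francisco-aragao/BridgeBuff | client/client.py | normalize_cannon_placement
-- ===== SOURCE A (Python) =====
-- def normalize_cannon_placement(cannon_placement):
--     # Step 1: Count the number of cannons in each row
--     row_counts = [0] * 5
--
--     for placement in cannon_placement:
--         row = placement[1]
--         row_counts[row] += 1
--
--     # Step 2: Count the number of rows with exactly i cannons
--     cannon_counts = [0] * 8
--
--     for count in row_counts:
--         if count < 8:
--             cannon_counts[count] += 1
--
--     # Step 3: Construct the 8-digit string
--     normalized_string = ''.join(map(str, cannon_counts))
--
--     return normalized_string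
-- ===== SOURCE B (Python) =====
-- def normalize_cannon_placement(cannon_placement):
--     # One pass: maintain the final histogram directly while counting rows.
--     cannon_counts = [5, 0, 0, 0, 0, 0, 0, 0]  # all 5 rows start with 0 cannons
--     row_counts = [0] * 5
--     for placement in cannon_placement:
--         row = placement[1]
--         old = row_counts[row]
--         if old < 8:
--             cannon_counts[old] -= 1
--         new = old + 1
--         row_counts[row] = new
--         if new < 8:
--             cannon_counts[new] += 1
--     return ''.join(map(str, cannon_counts))
-- ===== Notes on version B (the rewrite author's own statement) =====
-- stated objective: alternative
-- what changed: B maintains the 8-bucket histogram incrementally in a single pass over the placements (moving one row between buckets per placement), instead of A's two sequential passes (count per row, then re-scan the row counts to bucket them).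
import Mathlib
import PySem

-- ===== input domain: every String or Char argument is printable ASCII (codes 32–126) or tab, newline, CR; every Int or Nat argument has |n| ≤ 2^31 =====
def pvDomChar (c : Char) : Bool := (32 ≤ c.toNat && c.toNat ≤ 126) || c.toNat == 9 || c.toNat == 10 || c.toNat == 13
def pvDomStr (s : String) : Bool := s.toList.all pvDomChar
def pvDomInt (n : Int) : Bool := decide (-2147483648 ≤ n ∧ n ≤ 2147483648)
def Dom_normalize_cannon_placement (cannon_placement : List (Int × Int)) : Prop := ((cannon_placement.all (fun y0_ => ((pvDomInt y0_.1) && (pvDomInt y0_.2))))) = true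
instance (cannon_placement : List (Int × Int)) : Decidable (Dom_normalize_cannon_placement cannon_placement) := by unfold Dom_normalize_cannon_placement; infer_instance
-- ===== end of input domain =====

-- B replaces A's two sequential passes (count cannons per row, then bucket the row counts)
-- by a single pass that moves the affected row between histogram buckets at each placement
-- (objective: alternative decomposition, same O(n) cost).

-- ===== PORT A =====
-- row_counts[row] += 1   (Python indexing: negative indices wrap, out of range raises)
def pvRowStep (rc : List Int) (p : Int × Int) : List Int :=
  PySem.List.pySetD rc p.2 (PySem.List.pyGetD rc p.2 0 + 1)

-- if count < 8: cannon_counts[count] += 1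
def pvBump (cc : List Int) (count : Int) : List Int :=
  if count < 8 then PySem.List.pySetD cc count (PySem.List.pyGetD cc count 0 + 1) else cc

def normalize_cannon_placement (cannon_placement : List (Int × Int)) : String :=
  let row_counts := cannon_placement.foldl pvRowStep [0, 0, 0, 0, 0]
  let cannon_counts := row_counts.foldl pvBump [0, 0, 0, 0, 0, 0, 0, 0]
  PySem.Str.join "" (cannon_counts.map PySem.Int.toStr)

-- ===== PORT B =====
-- one placement: move the touched row from bucket `old` to bucket `old+1` (buckets ≥ 8 do not exist)
def pvMove (st : List Int × List Int) (p : Int × Int) : List Int × List Int :=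
  let old := PySem.List.pyGetD st.2 p.2 0
  let cc := if old < 8 then PySem.List.pySetD st.1 old (PySem.List.pyGetD st.1 old 0 - 1) else st.1
  let nw := old + 1
  let rc := PySem.List.pySetD st.2 p.2 nw
  let cc2 := if nw < 8 then PySem.List.pySetD cc nw (PySem.List.pyGetD cc nw 0 + 1) else cc
  (cc2, rc)

def normalize_cannon_placement_alt (cannon_placement : List (Int × Int)) : String :=
  let st := cannon_placement.foldl pvMove ([5, 0, 0, 0, 0, 0, 0, 0], [0, 0, 0, 0, 0])
  PySem.Str.join "" (st.1.map PySem.Int.toStr)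

-- ===== PRECONDITION & SPEC =====
-- Pre_ excludes exactly the inputs on which A raises IndexError: a row value outside
-- Python's index range -5..4 for the 5-element row_counts list.
def Pre_normalize_cannon_placement (cannon_placement : List (Int × Int)) : Prop :=
  ∀ p ∈ cannon_placement, PySem.Raise.InRange 5 p.2

instance (cannon_placement : List (Int × Int)) : Decidable (Pre_normalize_cannon_placement cannon_placement) := by
  unfold Pre_normalize_cannon_placement; infer_instance

def pvWitness_normalize_cannon_placement : (List (Int × Int)) := [(0, 1), (2, -1), (3, 1)]

def Spec_normalize_cannon_placement (cannon_placement : List (Int × Int)) (out : String) : Prop := out = normalize_cannon_placement_alt cannon_placement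
instance (cannon_placement : List (Int × Int)) (out : String) : Decidable (Spec_normalize_cannon_placement cannon_placement out) := by unfold Spec_normalize_cannon_placement; infer_instance

-- ===== CLAIM (what is proved, stated in full; the proofs are below) =====
def Claim_equal_normalize_cannon_placement : Prop := ∀ (cannon_placement : List (Int × Int)), Dom_normalize_cannon_placement cannon_placement → Pre_normalize_cannon_placement cannon_placement → Spec_normalize_cannon_placement cannon_placement (normalize_cannon_placement cannon_placement)

-- ===== LEMMAS AND PROOFS =====

-- the histogram: bucket j (0 ≤ j < 8) holds how many entries of rc equal j
def pvBucket (rc : List Int) : List Int :=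
  (List.range 8).map (fun j => Int.ofNat (rc.count (Int.ofNat j)))

theorem pvBucket_length (rc : List Int) : (pvBucket rc).length = 8 := by
  simp [pvBucket]

theorem pvIdx_norm (r : Int) (hr : PySem.Raise.InRange 5 r) :
    ∃ n : Nat, n < 5 ∧ PySem.List.pyIdx? 5 r = some n := by
  obtain ⟨h1, h2⟩ := hr
  by_cases h : 0 ≤ r
  · refine ⟨r.toNat, by omega, ?_⟩
    unfold PySem.List.pyIdx?
    rw [if_pos h, if_pos (by exact_mod_cast h2)]
  · refine ⟨5 - (-r).toNat, by omega, ?_⟩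
    unfold PySem.List.pyIdx?
    rw [if_neg h, if_pos (by exact_mod_cast h1)]

theorem pvGetD_norm (rc : List Int) (r : Int) (d : Int) {n : Nat} (h5 : rc.length = 5)
    (hn : n < 5) (hidx : PySem.List.pyIdx? 5 r = some n) :
    PySem.List.pyGetD rc r d = rc[n]'(by omega) := by
  unfold PySem.List.pyGetD PySem.List.pyGet?
  have hidx' : PySem.List.pyIdx? rc.length r = some n := by rw [h5]; exact hidx
  rw [hidx']
  simp [List.getElem?_eq_getElem (by omega : n < rc.length)]

theorem pvSetD_norm (rc : List Int) (r : Int) (v : Int) {n : Nat} (h5 : rc.length = 5)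
    (hidx : PySem.List.pyIdx? 5 r = some n) :
    PySem.List.pySetD rc r v = rc.set n v := by
  unfold PySem.List.pySetD PySem.List.pySet?
  rw [h5, hidx]
  rfl

theorem pvCount_set (l : List Int) (n : Nat) (v j : Int) (h : n < l.length) :
    (((l.set n v).count j : Int)) =
      (l.count j : Int) + (if v = j then 1 else 0) - (if l[n] = j then 1 else 0) := by
  induction l generalizing n with
  | nil => simp at h
  | cons a l ih =>
    cases n with
    | zero =>
      simp only [List.set, List.count_cons, beq_iff_eq, List.getElem_cons_zero]
      split_ifs <;> push_cast <;> omega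
    | succ m =>
      simp only [List.set, List.count_cons, beq_iff_eq, List.getElem_cons_succ]
      push_cast
      rw [show (((l.set m v).count j : Int)) = _ from ih m (by simpa using h)]
      split_ifs <;> omega

-- total getD views of PySem indexing on a nonnegative in-range index (no proof-carrying getElem)
theorem pvGetD_getD (cc : List Int) (c : Int) (d : Int) (h0 : 0 ≤ c)
    (hc : c < (cc.length : Int)) :
    PySem.List.pyGetD cc c d = cc.getD c.toNat d := by
  rw [PySem.List.pyGetD_eq_getElem cc d h0 hc, List.getD_eq_getElem _ _ (by omega)]

theorem pvSetD_getD (cc : List Int) (c : Int) (v : Int) (j : Nat) (h0 : 0 ≤ c)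
    (_hc : c < (cc.length : Int)) (hj : j < cc.length) :
    (PySem.List.pySetD cc c v).getD j 0 = if c = (j : Int) then v else cc.getD j 0 := by
  rw [PySem.List.pySetD_of_nonneg cc v h0,
    List.getD_eq_getElem _ 0 (by simpa using hj), List.getElem_set,
    List.getD_eq_getElem _ 0 hj]
  split_ifs with h1 h2 h2
  · rfl
  · omega
  · omega
  · rfl

theorem pvBucket_getD (rc : List Int) (j : Nat) (hj : j < 8) :
    (pvBucket rc).getD j 0 = (rc.count (j : Int) : Int) := by
  unfold pvBucket
  rw [List.getD_eq_getElem _ _ (by simpa using hj), List.getElem_map, List.getElem_range]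
  norm_num

theorem pvExt_getD (l1 l2 : List Int) (h1 : l1.length = 8) (h2 : l2.length = 8)
    (h : ∀ j : Nat, j < 8 → l1.getD j 0 = l2.getD j 0) : l1 = l2 := by
  refine List.ext_getElem (by omega) ?_
  intro j hja hjb
  have := h j (by omega)
  rwa [List.getD_eq_getElem _ _ hja, List.getD_eq_getElem _ _ hjb] at this

theorem pvBump_length (cc : List Int) (c : Int) : (pvBump cc c).length = cc.length := by
  unfold pvBump
  split_ifs
  · exact PySem.List.length_pySetD cc c _
  · rfl

theorem pvBump_getD (cc : List Int) (c : Int) (j : Nat) (h0 : 0 ≤ c)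
    (hlen : cc.length = 8) (hj : j < 8) :
    (pvBump cc c).getD j 0 = cc.getD j 0 + (if c = (j : Int) then 1 else 0) := by
  unfold pvBump
  by_cases h8 : c < 8
  · rw [if_pos h8, pvGetD_getD cc c 0 h0 (by omega),
      pvSetD_getD cc c _ j h0 (by omega) (by omega)]
    split_ifs with he
    · have hcj : c.toNat = j := by omega
      rw [hcj]
    · ring
  · rw [if_neg h8, if_neg (by omega)]
    ring

theorem pvPass2 (rc : List Int) (hpos : ∀ c ∈ rc, 0 ≤ c) :
    ∀ cc : List Int, cc.length = 8 →
      rc.foldl pvBump cc = (List.range 8).map (fun j => cc.getD j 0 + (rc.count (j : Int) : Int)) := by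
  induction rc with
  | nil =>
    intro cc hlen
    simp only [List.foldl_nil, List.count_nil]
    refine pvExt_getD cc _ hlen (by rw [List.length_map, List.length_range]) ?_
    intro j hj
    rw [List.getD_eq_getElem cc 0 (by omega),
      List.getD_eq_getElem _ 0 (by rw [List.length_map, List.length_range]; omega),
      List.getElem_map, List.getElem_range, List.getD_eq_getElem cc 0 (by omega)]
    push_cast
    ring
  | cons c rc ih =>
    intro cc hlen
    have hc0 : (0:Int) ≤ c := hpos c (by simp)
    simp only [List.foldl_cons]
    rw [ih (fun x hx => hpos x (by simp [hx])) (pvBump cc c) (by rw [pvBump_length, hlen])]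
    refine List.map_congr_left ?_
    intro j hj
    have hj8 : j < 8 := List.mem_range.mp hj
    rw [pvBump_getD cc c j hc0 hlen hj8]
    simp only [List.count_cons, beq_iff_eq]
    push_cast
    split_ifs <;> omega

theorem pvRowStep_set (rc : List Int) (p : Int × Int) (h5 : rc.length = 5)
    {n : Nat} (hn : n < 5) (hidx : PySem.List.pyIdx? 5 p.2 = some n) :
    pvRowStep rc p = rc.set n (rc[n]'(by omega) + 1) := by
  unfold pvRowStep
  rw [pvGetD_norm rc p.2 0 h5 hn hidx, pvSetD_norm rc p.2 _ h5 hidx]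

-- the single-pass step keeps the pair (histogram, row counts) in lock-step with A's row pass
theorem pvMove_eq (rc : List Int) (p : Int × Int) (h5 : rc.length = 5)
    (hpos : ∀ c ∈ rc, 0 ≤ c) (hr : PySem.Raise.InRange 5 p.2) :
    pvMove (pvBucket rc, rc) p = (pvBucket (pvRowStep rc p), pvRowStep rc p) := by
  obtain ⟨n, hn, hidx⟩ := pvIdx_norm p.2 hr
  have hrs := pvRowStep_set rc p h5 hn hidx
  have hbl := pvBucket_length rc
  have h0 : (0:Int) ≤ rc[n]'(by omega) := hpos _ (List.getElem_mem _)
  simp only [pvMove]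
  rw [pvGetD_norm rc p.2 0 h5 hn hidx, pvSetD_norm rc p.2 _ h5 hidx, ← hrs]
  congr 1
  by_cases h8 : rc[n]'(by omega) < 8
  · rw [if_pos h8]
    have hlen1 : (PySem.List.pySetD (pvBucket rc) (rc[n]'(by omega))
        (PySem.List.pyGetD (pvBucket rc) (rc[n]'(by omega)) 0 - 1)).length = 8 := by
      rw [PySem.List.length_pySetD, hbl]
    have hgetD1 : ∀ k : Int, 0 ≤ k → k < 8 →
        (PySem.List.pySetD (pvBucket rc) (rc[n]'(by omega))
          (PySem.List.pyGetD (pvBucket rc) (rc[n]'(by omega)) 0 - 1)).getD k.toNat 0 =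
        (rc.count k : Int) - (if rc[n]'(by omega) = k then 1 else 0) := by
      intro k hk0 hk8
      rw [pvSetD_getD (pvBucket rc) _ _ k.toNat h0 (by omega) (by omega)]
      have hkk : ((k.toNat : Nat) : Int) = k := by omega
      rw [hkk, pvBucket_getD _ k.toNat (by omega), hkk]
      split_ifs with he
      · rw [pvGetD_getD _ _ _ h0 (by omega), pvBucket_getD _ _ (by omega)]
        have : ((((rc[n]'(by omega)).toNat) : Nat) : Int) = k := by omega
        rw [this]
      · rfl
    by_cases h9 : rc[n]'(by omega) + 1 < 8
    · rw [if_pos h9]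
      have hv : PySem.List.pyGetD (PySem.List.pySetD (pvBucket rc) (rc[n]'(by omega))
            (PySem.List.pyGetD (pvBucket rc) (rc[n]'(by omega)) 0 - 1)) (rc[n]'(by omega) + 1) 0 =
          (rc.count (rc[n]'(by omega) + 1) : Int) := by
        rw [pvGetD_getD _ _ _ (by omega) (by omega),
          hgetD1 (rc[n]'(by omega) + 1) (by omega) (by omega), if_neg (by omega)]
        ring
      refine pvExt_getD _ _ (by rw [PySem.List.length_pySetD, hlen1]) (pvBucket_length _) ?_
      intro j hj
      rw [pvBucket_getD _ j hj, hrs, pvCount_set rc n _ j (by omega),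
        pvSetD_getD _ _ _ j (by omega) (by omega) (by omega), hv]
      have hgj := hgetD1 (j : Int) (by omega) (by omega)
      rw [show ((j : Int)).toNat = j by omega] at hgj
      rw [hgj]
      split_ifs with a b c
      · exfalso; omega
      · rw [a]; ring
      · ring
      · ring
    · rw [if_neg h9]
      refine pvExt_getD _ _ hlen1 (pvBucket_length _) ?_
      intro j hj
      rw [pvBucket_getD _ j hj, hrs, pvCount_set rc n _ j (by omega)]
      have hgj := hgetD1 (j : Int) (by omega) (by omega)
      rw [show ((j : Int)).toNat = j by omega] at hgj
      rw [hgj, if_neg (show ¬(rc[n]'(by omega) + 1 = (j : Int)) by omega)]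
      split_ifs with a
      · ring
      · ring
  · rw [if_neg h8, if_neg (by omega)]
    refine pvExt_getD _ _ hbl (pvBucket_length _) ?_
    intro j hj
    rw [pvBucket_getD _ j hj, hrs, pvBucket_getD _ j hj, pvCount_set rc n _ j (by omega),
      if_neg (show ¬(rc[n]'(by omega) + 1 = (j : Int)) by omega),
      if_neg (show ¬(rc[n]'(by omega) = (j : Int)) by omega)]
    ring

theorem pvRowStep_inv (rc : List Int) (p : Int × Int) (h5 : rc.length = 5)
    (hpos : ∀ c ∈ rc, 0 ≤ c) (hr : PySem.Raise.InRange 5 p.2) :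
    (pvRowStep rc p).length = 5 ∧ ∀ c ∈ pvRowStep rc p, 0 ≤ c := by
  obtain ⟨n, hn, hidx⟩ := pvIdx_norm p.2 hr
  rw [pvRowStep_set rc p h5 hn hidx]
  constructor
  · simp [h5]
  · intro c hc
    rcases List.mem_or_eq_of_mem_set hc with h | h
    · exact hpos c h
    · have := hpos (rc[n]'(by omega)) (List.getElem_mem _)
      omega

theorem pvRowFold_inv (cp : List (Int × Int)) :
    ∀ rc : List Int, rc.length = 5 → (∀ c ∈ rc, 0 ≤ c) →
      (∀ p ∈ cp, PySem.Raise.InRange 5 p.2) →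
      (cp.foldl pvRowStep rc).length = 5 ∧ ∀ c ∈ cp.foldl pvRowStep rc, 0 ≤ c := by
  induction cp with
  | nil => intro rc h5 hpos _; exact ⟨h5, hpos⟩
  | cons p cp ih =>
    intro rc h5 hpos hpre
    obtain ⟨h5', hpos'⟩ := pvRowStep_inv rc p h5 hpos (hpre p (by simp))
    simpa using ih (pvRowStep rc p) h5' hpos' (fun q hq => hpre q (by simp [hq]))

theorem pvLoop (cp : List (Int × Int)) :
    ∀ rc : List Int, rc.length = 5 → (∀ c ∈ rc, 0 ≤ c) →
      (∀ p ∈ cp, PySem.Raise.InRange 5 p.2) →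
      cp.foldl pvMove (pvBucket rc, rc) =
        (pvBucket (cp.foldl pvRowStep rc), cp.foldl pvRowStep rc) := by
  induction cp with
  | nil => intro rc _ _ _; rfl
  | cons p cp ih =>
    intro rc h5 hpos hpre
    have hr : PySem.Raise.InRange 5 p.2 := hpre p (by simp)
    obtain ⟨h5', hpos'⟩ := pvRowStep_inv rc p h5 hpos hr
    simp only [List.foldl_cons]
    rw [pvMove_eq rc p h5 hpos hr]
    exact ih (pvRowStep rc p) h5' hpos' (fun q hq => hpre q (by simp [hq]))

-- ===== VERDICT (by name: the statement is the Claim_ definition above) =====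
theorem normalize_cannon_placement_spec : Claim_equal_normalize_cannon_placement := by
  intro cp _ hpre
  unfold Spec_normalize_cannon_placement
  unfold normalize_cannon_placement normalize_cannon_placement_alt
  simp only
  have hrc0 : ([0, 0, 0, 0, 0] : List Int).length = 5 := rfl
  have hpos0 : ∀ c ∈ ([0, 0, 0, 0, 0] : List Int), (0:Int) ≤ c := by decide
  have hstart : (([5, 0, 0, 0, 0, 0, 0, 0] : List Int), ([0, 0, 0, 0, 0] : List Int))
      = (pvBucket [0, 0, 0, 0, 0], [0, 0, 0, 0, 0]) := by decide
  rw [hstart, pvLoop cp [0, 0, 0, 0, 0] hrc0 hpos0 hpre]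
  obtain ⟨hlen, hpos⟩ := pvRowFold_inv cp [0, 0, 0, 0, 0] hrc0 hpos0 hpre
  rw [pvPass2 _ hpos _ rfl]
  show PySem.Str.join "" _ =
    PySem.Str.join "" ((pvBucket (cp.foldl pvRowStep [0, 0, 0, 0, 0])).map PySem.Int.toStr)
  congr 1
  unfold pvBucket
  refine congrArg _ (List.map_congr_left ?_)
  intro j hj
  have hj8 : j < 8 := List.mem_range.mp hj
  have hz : (([0, 0, 0, 0, 0, 0, 0, 0] : List Int).getD j 0) = 0 := by
    interval_cases j <;> rfl
  rw [hz]
  have hcast : ((j : Nat) : Int) = Int.ofNat j := rfl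
  rw [hcast]
  simp [Int.ofNat_eq_natCast]
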